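-- pv_equiv track=rewrite | github.com/Lucas-Pavesys/ai-pavesys | LVD_Pavesys_V03.py | FiltroDeIndice
-- ===== SOURCE A (Python) =====
-- def FiltroDeIndice(indice):
--     ini_fim = []
--     if len(indice) != 0:
--         ini_fim = [indice[0]]
--         for valor in range(len(indice) - 1):
--             if indice[valor + 1 ] - indice[valor] != 1:
--                 ini_fim.append(indice[valor])
--                 ini_fim.append(indice[valor + 1])
--         ini_fim.append(indice[-1])
--     else:
--         pass
--     return ini_fim
-- ===== SOURCE B (Python) =====
-- def FiltroDeIndice(indice):
--     # Split into maximal consecutive runs, then emit [start, end] per run.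
--     runs = []
--     cur = []
--     for v in indice:
--         if cur and v - cur[-1] == 1:
--             cur.append(v)
--         else:
--             if cur:
--                 runs.append(cur)
--             cur = [v]
--     if cur:
--         runs.append(cur)
--     out = []
--     for r in runs:
--         out.append(r[0])
--         out.append(r[-1])
--     return out
-- ===== Notes on version B (the rewrite author's own statement) =====
-- stated objective: alternative
-- what changed: B partitions the list into maximal consecutive runs and emits [start, end] per run, instead of A's index loop over adjacent pairs that appends boundary elements around each break.
import Mathlib
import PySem

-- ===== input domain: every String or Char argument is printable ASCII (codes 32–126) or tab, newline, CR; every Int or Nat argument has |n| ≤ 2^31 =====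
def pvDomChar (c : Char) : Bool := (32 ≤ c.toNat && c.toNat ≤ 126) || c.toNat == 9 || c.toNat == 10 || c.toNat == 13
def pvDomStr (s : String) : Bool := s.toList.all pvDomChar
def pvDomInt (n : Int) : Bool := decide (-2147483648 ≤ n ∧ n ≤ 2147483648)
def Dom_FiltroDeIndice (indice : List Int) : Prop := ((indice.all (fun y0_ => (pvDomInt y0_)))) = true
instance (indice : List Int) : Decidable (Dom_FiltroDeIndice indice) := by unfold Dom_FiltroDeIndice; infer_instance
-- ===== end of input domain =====

-- B partitions the list into maximal consecutive runs and emits [start, end] per run,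
-- instead of A's index loop appending boundary elements around each break (alternative decomposition, same cost).


-- ===== PORT A =====
-- body of A's for-loop: one step for index `valor`
def pvAStep (indice : List Int) (acc : List Int) (valor : Int) : List Int :=
  if PySem.List.pyGetD indice (valor + 1) 0 - PySem.List.pyGetD indice valor 0 ≠ 1 then
    (acc ++ [PySem.List.pyGetD indice valor 0]) ++ [PySem.List.pyGetD indice (valor + 1) 0]
  else acc

def FiltroDeIndice (indice : List Int) : List Int :=
  if indice.length ≠ 0 then
    (((PySem.List.pyRange 0 ((indice.length : Int) - 1) 1).foldl (pvAStep indice)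
        [PySem.List.pyGetD indice 0 0]) ++ [PySem.List.pyGetD indice (-1) 0])
  else []

-- ===== PORT B =====
def pvAddRun (runs : List (List Int)) (cur : List Int) : List (List Int) :=
  if cur ≠ [] then runs ++ [cur] else runs

def pvBuildRuns (runs : List (List Int)) (cur : List Int) : List Int → List (List Int)
  | [] => pvAddRun runs cur
  | v :: rest =>
    if cur ≠ [] ∧ v - cur.getLastD 0 = 1 then pvBuildRuns runs (cur ++ [v]) rest
    else pvBuildRuns (pvAddRun runs cur) [v] rest

def FiltroDeIndice_alt (indice : List Int) : List Int :=
  (pvBuildRuns [] [] indice).foldl (fun out r => (out ++ [r.headD 0]) ++ [r.getLastD 0]) []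

-- ===== PRECONDITION & SPEC =====
def Spec_FiltroDeIndice (indice : List Int) (out : List Int) : Prop := out = FiltroDeIndice_alt indice
instance (indice : List Int) (out : List Int) : Decidable (Spec_FiltroDeIndice indice out) := by unfold Spec_FiltroDeIndice; infer_instance

-- ===== CLAIM (what is proved, stated in full; the proofs are below) =====
def Claim_equal_FiltroDeIndice : Prop := ∀ (indice : List Int), Dom_FiltroDeIndice indice → Spec_FiltroDeIndice indice (FiltroDeIndice indice)

-- ===== LEMMAS AND PROOFS =====

-- common normal form: output of the pair scan starting after previous element p
def pvPairs (p : Int) : List Int → List Int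
  | [] => []
  | v :: r => (if v - p ≠ 1 then [p, v] else []) ++ pvPairs v r

-- A's loop step with a Nat index (casts removed)
def pvAStepN (l : List Int) (acc : List Int) (k : Nat) : List Int :=
  if l.getD (k + 1) 0 - l.getD k 0 ≠ 1 then (acc ++ [l.getD k 0]) ++ [l.getD (k + 1) 0] else acc

theorem pvAStep_nat (l : List Int) (a : List Int) (k : Nat) :
    pvAStep l a ((k : Nat) : Int) = pvAStepN l a k := by
  unfold pvAStep pvAStepN
  rw [show ((k : Int) + 1) = ((k + 1 : Nat) : Int) by push_cast; ring]
  rw [PySem.List.pyGetD_natCast, PySem.List.pyGetD_natCast]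

theorem pvA_loopN (l : List Int) : ∀ (p : Int) (acc : List Int),
    (List.range l.length).foldl (pvAStepN (p :: l)) acc = acc ++ pvPairs p l := by
  induction l with
  | nil => intro p acc; simp [pvPairs]
  | cons v r ih =>
    intro p acc
    rw [List.length_cons, List.range_succ_eq_map, List.foldl_cons, List.foldl_map]
    rw [PySem.List.foldl_congr_mem _ _ (pvAStepN (v :: r)) _
      (fun a k _ => by simp [pvAStepN, Nat.succ_eq_add_one])]
    rw [ih v]
    have h0 : pvAStepN (p :: v :: r) acc 0 = acc ++ (if v - p ≠ 1 then [p, v] else []) := by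
      by_cases h : v - p = 1 <;> simp [pvAStepN, List.getD, h]
    rw [h0, List.append_assoc]
    rfl

theorem pvA_closed (x : Int) (xs : List Int) :
    FiltroDeIndice (x :: xs) = x :: (pvPairs x xs ++ [(x :: xs).getLast?.getD 0]) := by
  unfold FiltroDeIndice
  rw [if_pos (by simp : ¬((x :: xs).length = 0))]
  have hr : PySem.List.pyRange 0 (((x :: xs).length : Int) - 1) 1
      = (List.range xs.length).map (fun k => ((k : Nat) : Int)) := by
    rw [PySem.List.pyRange_one]
    rw [show ((((x :: xs).length : Int) - 1 - 0).toNat) = xs.length by simp]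
    exact List.map_congr_left (fun k _ => by simp)
  rw [hr, List.foldl_map]
  rw [PySem.List.foldl_congr_mem _ _ (pvAStepN (x :: xs)) _
    (fun a k _ => pvAStep_nat (x :: xs) a k)]
  rw [pvA_loopN xs x]
  have hlast : PySem.List.pyGetD (x :: xs) (-1) 0 = (x :: xs).getLast?.getD 0 := by
    rw [PySem.List.pyGetD_neg_one (x :: xs) 0 (by simp),
        List.getLast?_eq_some_getLast (l := x :: xs) (by simp)]
    rfl
  rw [hlast]
  have h0 : PySem.List.pyGetD (x :: xs) 0 0 = x := by
    simp [PySem.List.pyGetD_zero_cons]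
  rw [h0]
  simp

-- B side: emitting [head, last] over the runs
theorem pvEmit_append (rs ts : List (List Int)) (acc : List Int) :
    (rs ++ ts).foldl (fun out r => (out ++ [r.headD 0]) ++ [r.getLastD 0]) acc
      = ts.foldl (fun out r => (out ++ [r.headD 0]) ++ [r.getLastD 0])
          (rs.foldl (fun out r => (out ++ [r.headD 0]) ++ [r.getLastD 0]) acc) :=
  List.foldl_append

theorem pvB_loop (l : List Int) : ∀ (runs : List (List Int)) (s : Int) (mid : List Int) (acc : List Int),
    (pvBuildRuns runs (s :: mid) l).foldl (fun out r => (out ++ [r.headD 0]) ++ [r.getLastD 0]) acc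
      = (runs.foldl (fun out r => (out ++ [r.headD 0]) ++ [r.getLastD 0]) acc)
        ++ [s] ++ pvPairs ((s :: mid).getLastD 0) l ++ [((s :: mid).getLastD 0 :: l).getLastD 0] := by
  induction l with
  | nil =>
    intro runs s mid acc
    simp [pvBuildRuns, pvAddRun, pvPairs]
  | cons v rest ih =>
    intro runs s mid acc
    by_cases h : v - (s :: mid).getLastD 0 = 1
    · rw [show pvBuildRuns runs (s :: mid) (v :: rest) = pvBuildRuns runs ((s :: mid) ++ [v]) rest by
        rw [List.getLastD_eq_getLast?] at h
        simp [pvBuildRuns, h]]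
      rw [show (s :: mid) ++ [v] = s :: (mid ++ [v]) by simp]
      rw [ih runs s (mid ++ [v]) acc]
      have hl : (s :: (mid ++ [v])).getLastD 0 = v := by
        have h2 : ((s :: mid) ++ [v]).getLast? = some v := List.getLast?_concat
        simp only [List.cons_append] at h2
        simp [List.getLastD_eq_getLast?, h2]
      rw [hl]
      rw [List.getLastD_eq_getLast?] at h ⊢
      simp [pvPairs, h]
    · rw [show pvBuildRuns runs (s :: mid) (v :: rest) = pvBuildRuns (pvAddRun runs (s :: mid)) [v] rest by
        rw [List.getLastD_eq_getLast?] at h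
        simp [pvBuildRuns, h]]
      rw [show pvAddRun runs (s :: mid) = runs ++ [s :: mid] by simp [pvAddRun]]
      rw [ih (runs ++ [s :: mid]) v [] acc]
      rw [pvEmit_append]
      rw [List.getLastD_eq_getLast?] at h ⊢
      simp [pvPairs, h, List.append_assoc, List.getLastD_eq_getLast?]

theorem pvAB (indice : List Int) : FiltroDeIndice indice = FiltroDeIndice_alt indice := by
  cases indice with
  | nil => rfl
  | cons x xs =>
    rw [pvA_closed]
    unfold FiltroDeIndice_alt
    rw [show pvBuildRuns [] [] (x :: xs) = pvBuildRuns [] [x] xs by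
      simp [pvBuildRuns, pvAddRun]]
    rw [pvB_loop xs [] x [] []]
    simp [List.getLastD_eq_getLast?]

-- ===== VERDICT (by name: the statement is the Claim_ definition above) =====
theorem FiltroDeIndice_spec : Claim_equal_FiltroDeIndice := by
  intro indice _
  unfold Spec_FiltroDeIndice
  exact pvAB indice
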